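-- pv_equiv track=rewrite | github.com/sosy-lab/benchexec | benchexec/resources.py | get_closest_nodes
-- ===== SOURCE A (Python) =====
-- from typing import Optional, List, Dict
--
-- def get_closest_nodes(distance_list: List[int]) -> List[int]:  # 10 11 11 11 20 20 20 20
--     """
--     This function groups nodes according to their distance from each other.
--
--     @param: list of distances of all nodes from the node that the list is retrieved from
--     @return: list of the indices of the node itself (smallest distance) and its next neighbours by distance.
--
--     We assume that the distance to other nodes is smaller than the distance of the core to itself.
--
--     The indices are the same as the node IDs. That means that in a list [10 11 20 20],
--     the distance from node0 to node0 is 10, the distance from node0 to node1 (index1 of the list) is 11,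
--     and the distance from node0 to node2 and node3 is both 20.
--
--     If there are only 2 different distances available, they are assigned into different groups.
--     """
--     sorted_distance_list = sorted(distance_list)
--     smallest_distance = sorted_distance_list[0]
--     greatest_distance = sorted_distance_list[-1]
--     for value in sorted_distance_list:
--         if value != smallest_distance:
--             second_to_smallest = value
--             break
--     group_list = []
--     if distance_list.count(smallest_distance) == 1:
--         group_list.append(distance_list.index(smallest_distance))
--     else:
--         # we assume that all other nodes are slower to access than the core itself
--         raise Exception("More then one smallest distance")
--     if second_to_smallest != greatest_distance:
--         index = 0
--         for dist in distance_list: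
--             if dist == second_to_smallest:
--                 group_list.append(index)
--             index += 1
--     return group_list  # [0 1 2 3]
-- ===== SOURCE B (Python) =====
-- def get_closest_nodes(distance_list):
--     """Re-implementation without sorting: min(), first index, min of the non-minimal values, max()."""
--     smallest = min(distance_list)
--     result = [distance_list.index(smallest)]
--     rest = [d for d in distance_list if d != smallest]
--     if rest:
--         second = min(rest)
--         if second != max(distance_list):
--             result += [i for i, d in enumerate(distance_list) if d == second]
--     return result
-- ===== Notes on version B (the rewrite author's own statement) =====
-- stated objective: idiomatic
-- what changed: Replaces the sort-based tier detection with linear passes: min(), first-index, min of the non-minimal values and max() instead of sorting and scanning the sorted list.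
import Mathlib
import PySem

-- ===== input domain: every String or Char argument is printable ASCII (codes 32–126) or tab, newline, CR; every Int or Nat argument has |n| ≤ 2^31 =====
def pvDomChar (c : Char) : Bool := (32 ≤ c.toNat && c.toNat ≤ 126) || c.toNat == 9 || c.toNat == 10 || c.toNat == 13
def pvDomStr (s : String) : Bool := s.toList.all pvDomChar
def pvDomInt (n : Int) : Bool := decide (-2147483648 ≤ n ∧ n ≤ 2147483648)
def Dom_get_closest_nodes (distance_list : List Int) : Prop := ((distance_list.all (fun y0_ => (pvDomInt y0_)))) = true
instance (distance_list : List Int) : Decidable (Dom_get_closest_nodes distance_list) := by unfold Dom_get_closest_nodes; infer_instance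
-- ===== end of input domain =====

-- B replaces A's sort-and-scan by linear passes (min, first index, min of non-minimal values, max); equal return values proved on Pre_.


-- ===== PORT A =====
def get_closest_nodes (distance_list : List Int) : List Int :=
  let sorted_distance_list := PySem.List.sorted distance_list (fun x => x) false
  match PySem.List.pyGet? sorted_distance_list 0, PySem.List.pyGet? sorted_distance_list (-1) with
  | some smallest, some greatest =>
    -- 'for value in sorted_distance_list: if value != smallest: second = value; break'
    let second? := sorted_distance_list.foldl
      (fun acc v => match acc with
        | some _ => acc
        | none => if v ≠ smallest then some v else none) (none : Option Int)
    if PySem.List.count distance_list smallest = 1 then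
      let group_list : List Int :=
        match PySem.List.index? distance_list smallest with
        | some i => [(i : Int)]
        | none => []
      match second? with
      | some second =>
        if second ≠ greatest then
          -- 'index = 0; for dist in distance_list: if dist == second: append(index); index += 1'
          (distance_list.foldl
            (fun (st : List Int × Int) dist =>
              (if dist = second then st.1 ++ [st.2] else st.1, st.2 + 1))
            (group_list, 0)).1
        else group_list
      | none => []   -- Python: UnboundLocalError (outside Pre_)
    else []          -- Python: raise Exception (outside Pre_)
  | _, _ => []       -- Python: IndexError on the empty list (outside Pre_)

-- ===== PORT B =====
def get_closest_nodes_alt (distance_list : List Int) : List Int :=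
  match PySem.List.min? distance_list (fun x => x) with
  | none => []       -- min([]) raises (outside Pre_)
  | some smallest =>
    let result : List Int :=
      match PySem.List.index? distance_list smallest with
      | none => []
      | some i => [(i : Int)]
    let rest := distance_list.filter (fun d => d ≠ smallest)
    match rest with
    | [] => result
    | _ :: _ =>
      match PySem.List.min? rest (fun x => x), PySem.List.max? distance_list (fun x => x) with
      | none, _ => result
      | _, none => result
      | some second, some greatest =>
        if second ≠ greatest then
          result ++ (PySem.List.enumerate distance_list 0).filterMap
            (fun p => if p.2 = second then some p.1 else none)
        else result

-- ===== PRECONDITION & SPEC =====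
-- Pre_ excludes exactly the inputs on which A raises: the empty list (IndexError), lists whose
-- minimum occurs more than once (explicit Exception), and lists whose elements are all equal
-- (UnboundLocalError: 'second_to_smallest' is never bound).
def Pre_get_closest_nodes (distance_list : List Int) : Prop :=
  distance_list ≠ [] ∧
  PySem.List.count distance_list ((PySem.List.min? distance_list (fun x => x)).getD 0) = 1 ∧
  ∃ x ∈ distance_list, x ≠ (PySem.List.min? distance_list (fun x => x)).getD 0
instance (distance_list : List Int) : Decidable (Pre_get_closest_nodes distance_list) := by
  unfold Pre_get_closest_nodes; infer_instance
def pvWitness_get_closest_nodes : List Int := [10, 11, 11, 20]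

def Spec_get_closest_nodes (distance_list : List Int) (out : List Int) : Prop :=
  out = get_closest_nodes_alt distance_list
instance (distance_list : List Int) (out : List Int) : Decidable (Spec_get_closest_nodes distance_list out) := by
  unfold Spec_get_closest_nodes; infer_instance

-- ===== CLAIM (what is proved, stated in full; the proofs are below) =====
def Claim_equal_get_closest_nodes : Prop := ∀ (distance_list : List Int), Dom_get_closest_nodes distance_list → Pre_get_closest_nodes distance_list → Spec_get_closest_nodes distance_list (get_closest_nodes distance_list)
-- ===== LEMMAS AND PROOFS =====

-- A's index-counting loop produces the indices (from i0) of the elements equal to 'second'.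
theorem pvA_index_loop (l : List Int) (second : Int) (acc : List Int) (i0 : Int) :
    (l.foldl (fun (st : List Int × Int) dist =>
        (if dist = second then st.1 ++ [st.2] else st.1, st.2 + 1)) (acc, i0)).1
      = acc ++ (PySem.List.enumerate l i0).filterMap
          (fun p => if p.2 = second then some p.1 else none) := by
  induction l generalizing acc i0 with
  | nil => simp [PySem.List.enumerate_nil]
  | cons d t ih =>
      simp only [List.foldl_cons, PySem.List.enumerate_cons, List.filterMap_cons]
      by_cases h : d = second <;> simp [h, ih]

-- A's break-loop (first element ≠ smallest) is find?.
theorem pvA_break_loop (l : List Int) (m : Int) (acc : Option Int) :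
    (l.foldl (fun acc v => match acc with
        | some _ => acc
        | none => if v ≠ m then some v else none) acc)
      = acc.orElse (fun _ => l.find? (fun v => v ≠ m)) := by
  induction l generalizing acc with
  | nil => cases acc <;> simp
  | cons x t ih =>
      cases acc with
      | some a => rw [List.foldl_cons]; simpa using ih (some a)
      | none =>
          rw [List.foldl_cons]
          by_cases h : x = m
          · simpa [h, List.find?] using ih none
          · have : (if x ≠ m then some x else none) = some x := by simp [h]
            simp only [this]
            rw [show (List.foldl (fun acc v => match acc with
                | some _ => acc
                | none => if v ≠ m then some v else none) (some x) t) = some x from by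
              simpa using ih (some x)]
            simp [List.find?, h]

-- A's break-loop from the initial 'none' accumulator.
theorem pvA_break_loop_none (l : List Int) (m : Int) :
    (l.foldl (fun acc v => match acc with
        | some _ => acc
        | none => if v ≠ m then some v else none) (none : Option Int))
      = l.find? (fun v => v ≠ m) := by
  rw [pvA_break_loop]; rfl

-- In a Pairwise-(≤) list every element is ≤ the last one.
theorem pvLe_getLast (l : List Int) (hp : l.Pairwise (· ≤ ·)) (h : l ≠ []) :
    ∀ x ∈ l, x ≤ l.getLast h := by
  induction l with
  | nil => simp at h
  | cons a t ih =>
      intro x hx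
      cases t with
      | nil => simp at hx; simp [hx, List.getLast]
      | cons b u =>
          rw [List.getLast_cons (by simp)]
          rcases List.mem_cons.mp hx with rfl | hx'
          · exact le_trans (List.rel_of_pairwise_cons hp (List.getLast_mem _))
              (le_refl _)
          · exact ih (List.Pairwise.of_cons hp) (by simp) x hx'

-- min? over v equals the head of any sorted (Pairwise ≤) rearrangement u of v.
theorem pvMin_eq_head (u v : List Int) (hperm : u.Perm v) (hp : u.Pairwise (· ≤ ·))
    (m : Int) (t : List Int) (hu : u = m :: t) :
    PySem.List.min? v (fun x => x) = some m := by
  subst hu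
  cases hmin : PySem.List.min? v (fun x => x) with
  | none =>
      have hv := (PySem.List.min?_eq_none_iff _ _).mp hmin
      subst hv
      exact absurd hperm.symm (by simp)
  | some m' =>
      have hm'v : m' ∈ v := PySem.List.min?_mem hmin
      have h1 : m' ≤ m := PySem.List.min?_isMin hmin m (hperm.mem_iff.mp (by simp))
      have h2 : m ≤ m' := by
        rcases List.mem_cons.mp (hperm.mem_iff.mpr hm'v) with rfl | h
        · exact le_refl _
        · exact List.rel_of_pairwise_cons hp h
      rw [le_antisymm h1 h2]

-- max? over l equals the last of the sorted list.
theorem pvMax_eq_getLast (u v : List Int) (hperm : u.Perm v) (hp : u.Pairwise (· ≤ ·))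
    (h : u ≠ []) :
    PySem.List.max? v (fun x => x) = some (u.getLast h) := by
  cases hmax : PySem.List.max? v (fun x => x) with
  | none =>
      have hv := (PySem.List.max?_eq_none_iff _ _).mp hmax
      subst hv
      exact absurd (List.Perm.eq_nil hperm) h
  | some M =>
      have hMv : M ∈ v := PySem.List.max?_mem hmax
      have h1 : u.getLast h ≤ M :=
        PySem.List.max?_isMax hmax _ (hperm.mem_iff.mp (List.getLast_mem h))
      have h2 : M ≤ u.getLast h := pvLe_getLast u hp h M (hperm.mem_iff.mpr hMv)
      rw [le_antisymm h2 h1]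

-- ===== VERDICT (by name: the statement is the Claim_ definition above) =====
theorem get_closest_nodes_spec : Claim_equal_get_closest_nodes := by
  intro l _ hpre
  obtain ⟨hne, hcnt, hex⟩ := hpre
  unfold Spec_get_closest_nodes
  have hperm : (PySem.List.sorted l (fun x => x) false).Perm l := PySem.List.sorted_perm l _ _
  have hp : (PySem.List.sorted l (fun x => x) false).Pairwise (· ≤ ·) :=
    PySem.List.sorted_pairwise l _
  cases hsC : PySem.List.sorted l (fun x => x) false with
  | nil => exact absurd ((PySem.List.sorted_eq_nil_iff _ _ _).mp hsC) hne
  | cons m t =>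
      rw [hsC] at hperm hp
      have hmin : PySem.List.min? l (fun x => x) = some m :=
        pvMin_eq_head (m :: t) l hperm hp m t rfl
      have hgl : (m :: t).getLast (by simp) ∈ l := hperm.mem_iff.mp (List.getLast_mem _)
      have hmax : PySem.List.max? l (fun x => x) = some ((m :: t).getLast (by simp)) :=
        pvMax_eq_getLast (m :: t) l hperm hp (by simp)
      have hcnt' : PySem.List.count l m = 1 := by rwa [hmin] at hcnt
      -- rest of B is nonempty
      obtain ⟨x, hxl, hxm⟩ := hex
      rw [hmin] at hxm
      simp only [Option.getD_some] at hxm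
      have hrest : l.filter (fun d => d ≠ m) ≠ [] := by
        intro hf
        have hxmem : x ∈ l.filter (fun d => d ≠ m) := by
          simp [List.mem_filter, hxl, hxm]
        rw [hf] at hxmem; simp at hxmem
      -- the filtered sorted list:
      have hpermf : ((m :: t).filter (fun d => d ≠ m)).Perm (l.filter (fun d => d ≠ m)) :=
        hperm.filter _
      have hpf : ((m :: t).filter (fun d => d ≠ m)).Pairwise (· ≤ ·) := hp.filter _
      cases hfC : (m :: t).filter (fun d => d ≠ m) with
      | nil =>
          rw [hfC] at hpermf
          exact absurd (List.Perm.eq_nil hpermf.symm) hrest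
      | cons f0 ft =>
          rw [hfC] at hpermf hpf
          have hminr : PySem.List.min? (l.filter (fun d => d ≠ m)) (fun x => x) = some f0 :=
            pvMin_eq_head (f0 :: ft) _ hpermf hpf f0 ft rfl
          -- A's break loop value
          have hfind : (m :: t).find? (fun v => decide (v ≠ m)) = some f0 := by
            rw [← List.head?_filter, hfC]; rfl
          -- reduce A
          unfold get_closest_nodes
          rw [hsC]
          have hg0 : PySem.List.pyGet? (m :: t) 0 = some m := by
            simp [PySem.List.pyGet?, PySem.List.pyIdx?]
          have hg1 : PySem.List.pyGet? (m :: t) (-1) = some ((m :: t).getLast (by simp)) := by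
            simp [PySem.List.pyGet?, PySem.List.pyIdx?]
            exact List.getElem_cons_length rfl
          simp only [hg0, hg1]
          simp only [pvA_break_loop_none, hfind, hcnt', if_true]
          -- reduce B
          unfold get_closest_nodes_alt
          simp only [hmin]
          cases hlC : l.filter (fun d => d ≠ m) with
          | nil => exact absurd hlC hrest
          | cons r0 rt =>
              rw [hlC] at hminr
              simp only [hminr, hmax, pvA_index_loop]
              cases PySem.List.index? l m <;> rfl
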